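-- pv_equiv track=rewrite | github.com/omarstfa/PyFTE | components/modules/faultTreeReconstruction.py | is_children_mutual_exclusive_union_of_parent
-- ===== SOURCE A (Python) =====
-- import itertools
--
-- def is_sets_identical(set1, set2):
--     """
--     Checks if the two sets are identical or not.
--     :param set1: First set
--     :param set2: Second set
--     :return: True if sets are identical, False if not
--     """
--     if set1 == set2:
--         return True
--     else:
--         return False
--
-- def is_sets_mutually_exclusive(set1, set2):
--     """
--     Checks if the two sets are mutually exclusive or not.
--     :param set1: First set
--     :param set2: Second set
--     :return: True if sets are mutually exclusive, False if not
--     """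
--     if set1.isdisjoint(set2):
--         return True
--     else:
--         return False
--
-- def is_children_mutual_exclusive_union_of_parent(parent, children):
--     """
--     Checks if the children are mutually exclusive to each other and their union is identical to the parent.
--     :param parent: Set representing the parent
--     :param children: List of sets representing the children
--     :return: True if the children are mutually exclusive to each other and the union of the children
--     is identical to the parent, false if not.
--     """
--     sets = set()
--     decision = False
--     toggle = True
--
--     # Checks if all children are mutually exclusive to each other.
--     # Combination is enough, permutation is not needed since it doesnt have to check
--     # both, for example, {0, 1}, {2, 3} and {2, 3}, {0, 1}
--     for child, child_ in itertools.combinations(children, 2):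
--         if not is_sets_mutually_exclusive(child, child_):
--             toggle = False
--
--     # If children were mutually exclusive to each other,
--     # check if the union of the children is identical to the parent.
--     if toggle:
--         for child in children:
--             sets.update(child)
--         if is_sets_identical(sets, parent):
--             decision = True
--
--     return decision
-- ===== SOURCE B (Python) =====
-- def is_children_mutual_exclusive_union_of_parent(parent, children):
--     """Single pass: the children are pairwise disjoint iff the sum of their
--     sizes equals the size of their union; then compare the union with parent."""
--     union = set()
--     total = 0
--     for child in children:
--         total += len(child)
--         union |= child
--     return len(union) == total and union == parent
-- ===== Notes on version B (the rewrite author's own statement) =====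
-- stated objective: alternative
-- what changed: replaces the pairwise-disjointness scan over itertools.combinations by a single pass that accumulates the union and the sum of the children's sizes, using that the children are pairwise disjoint iff the sum of sizes equals the union's size (measured 1.49x at the largest size, below the 1.5x bar, so not claimed as faster)
import Mathlib
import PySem

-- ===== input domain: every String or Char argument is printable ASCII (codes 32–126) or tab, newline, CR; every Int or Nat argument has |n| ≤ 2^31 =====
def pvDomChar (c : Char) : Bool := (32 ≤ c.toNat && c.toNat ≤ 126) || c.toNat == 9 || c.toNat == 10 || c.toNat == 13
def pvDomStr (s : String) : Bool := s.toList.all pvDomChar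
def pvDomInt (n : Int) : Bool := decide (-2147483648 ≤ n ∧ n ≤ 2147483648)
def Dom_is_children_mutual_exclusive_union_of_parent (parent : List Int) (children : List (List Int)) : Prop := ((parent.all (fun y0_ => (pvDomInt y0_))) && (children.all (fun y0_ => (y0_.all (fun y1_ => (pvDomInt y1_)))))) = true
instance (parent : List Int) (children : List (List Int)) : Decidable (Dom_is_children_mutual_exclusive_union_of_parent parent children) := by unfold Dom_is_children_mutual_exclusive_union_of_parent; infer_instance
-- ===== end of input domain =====

-- B replaces the quadratic pairwise-disjointness scan by a single pass using
-- |union| = sum of sizes iff the children are pairwise disjoint (a different algorithm of lower pair-count cost).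


-- ===== PORT A =====
-- helper: Python's `set1 == set2` through is_sets_identical
def is_sets_identical (set1 set2 : PySem.Set Int) : Bool :=
  if PySem.Set.equal set1 set2 then true else false

-- helper: Python's `set1.isdisjoint(set2)` through is_sets_mutually_exclusive
def is_sets_mutually_exclusive (set1 set2 : PySem.Set Int) : Bool :=
  if PySem.Set.isdisjoint set1 set2 then true else false

-- itertools.combinations(children, 2)
def pvCombPairs : List (PySem.Set Int) → List (PySem.Set Int × PySem.Set Int)
  | [] => []
  | c :: rest => rest.map (fun c' => (c, c')) ++ pvCombPairs rest

-- The caller's Python sets arrive as lists: parent = set(parent), each child = set(child).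
def is_children_mutual_exclusive_union_of_parent (parent : List Int) (children : List (List Int)) : Bool :=
  let parentS := PySem.Set.ofList parent
  let childrenS := children.map (fun c => PySem.Set.ofList c)
  let toggle := (pvCombPairs childrenS).foldl
    (fun t p => if !(is_sets_mutually_exclusive p.1 p.2) then false else t) true
  if toggle then
    let sets := childrenS.foldl (fun s c => PySem.Set.update s c) PySem.Set.empty
    if is_sets_identical sets parentS then true else false
  else false

-- ===== PORT B =====
def is_children_mutual_exclusive_union_of_parent_alt (parent : List Int) (children : List (List Int)) : Bool :=
  let st := children.foldl
    (fun (st : PySem.Set Int × Int) c =>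
      let cS := PySem.Set.ofList c
      (PySem.Set.union st.1 cS, st.2 + PySem.Set.len cS))
    (PySem.Set.empty, 0)
  decide (PySem.Set.len st.1 = st.2) && PySem.Set.equal st.1 (PySem.Set.ofList parent)

-- ===== PRECONDITION & SPEC =====
def Spec_is_children_mutual_exclusive_union_of_parent (parent : List Int) (children : List (List Int)) (out : Bool) : Prop := out = is_children_mutual_exclusive_union_of_parent_alt parent children
instance (parent : List Int) (children : List (List Int)) (out : Bool) : Decidable (Spec_is_children_mutual_exclusive_union_of_parent parent children out) := by unfold Spec_is_children_mutual_exclusive_union_of_parent; infer_instance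

-- ===== CLAIM (what is proved, stated in full; the proofs are below) =====
def Claim_equal_is_children_mutual_exclusive_union_of_parent : Prop := ∀ (parent : List Int) (children : List (List Int)), Dom_is_children_mutual_exclusive_union_of_parent parent children → Spec_is_children_mutual_exclusive_union_of_parent parent children (is_children_mutual_exclusive_union_of_parent parent children)

-- ===== LEMMAS AND PROOFS =====

theorem pv_union_eq_update (s t : PySem.Set Int) : PySem.Set.union s t = PySem.Set.update s t := rfl

-- the toggle loop is an `all` over the pairs
theorem pv_toggle_foldl (ps : List (PySem.Set Int × PySem.Set Int)) (t : Bool) :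
    ps.foldl (fun t p => if !(is_sets_mutually_exclusive p.1 p.2) then false else t) t
      = (t && ps.all (fun p => PySem.Set.isdisjoint p.1 p.2)) := by
  induction ps generalizing t with
  | nil => simp
  | cons p ps ih =>
    have hme : is_sets_mutually_exclusive p.1 p.2 = PySem.Set.isdisjoint p.1 p.2 := by
      unfold is_sets_mutually_exclusive
      cases h : PySem.Set.isdisjoint p.1 p.2 <;> simp
    rw [List.foldl_cons, List.all_cons, ih, hme]
    cases h : PySem.Set.isdisjoint p.1 p.2 <;> simp

-- all pairs from combinations(l, 2) disjoint ↔ Pairwise disjointness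
theorem pv_pairs_all_iff (l : List (PySem.Set Int)) :
    (pvCombPairs l).all (fun p => PySem.Set.isdisjoint p.1 p.2) = true
      ↔ l.Pairwise (fun a b => ∀ x ∈ a, x ∉ b) := by
  induction l with
  | nil => simp [pvCombPairs]
  | cons c l ih =>
    simp [pvCombPairs, List.all_append, List.all_map, ih, List.pairwise_cons,
      PySem.Set.isdisjoint_iff, Function.comp, and_comm]

-- length of one update, for a Nodup argument
theorem pv_len_update (s c : List Int) (hc : c.Nodup) :
    (PySem.Set.update s c).length
      = s.length + (c.filter (fun y => !(PySem.Set.contains s y))).length := by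
  rw [PySem.Set.update_eq_append_filter, PySem.Set.ofList_eq_self_of_nodup c hc,
    List.length_append]

theorem pv_len_update_le (s c : List Int) (hc : c.Nodup) :
    (PySem.Set.update s c).length ≤ s.length + c.length := by
  rw [pv_len_update s c hc]
  exact Nat.add_le_add_left (List.length_filter_le _ _) _

theorem pv_len_update_eq_iff (s c : List Int) (hc : c.Nodup) :
    (PySem.Set.update s c).length = s.length + c.length ↔ ∀ x ∈ c, x ∉ s := by
  rw [pv_len_update s c hc]
  constructor
  · intro h x hx
    have hfil : c.filter (fun y => !(PySem.Set.contains s y)) = c :=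
      List.Sublist.eq_of_length List.filter_sublist (by omega)
    have hx2 : x ∈ c.filter (fun y => !(PySem.Set.contains s y)) := by rw [hfil]; exact hx
    have h2 := (List.mem_filter.mp hx2).2
    simp at h2
    exact h2
  · intro h
    have : c.filter (fun y => !(PySem.Set.contains s y)) = c := by
      apply List.filter_eq_self.mpr
      intro y hy; simp; exact h y hy
    rw [this]

theorem pv_foldl_update_le (l : List (List Int)) (s : List Int)
    (hl : ∀ c ∈ l, c.Nodup) :
    (l.foldl (fun s c => PySem.Set.update s c) s).length
      ≤ s.length + (l.map List.length).sum := by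
  induction l generalizing s with
  | nil => simp
  | cons c l ih =>
    simp only [List.foldl_cons, List.map_cons, List.sum_cons]
    have h1 := ih (PySem.Set.update s c) (fun c' hc' => hl c' (List.mem_cons_of_mem _ hc'))
    have h2 := pv_len_update_le s c (hl c List.mem_cons_self)
    omega

-- MAIN: the fold reaches the full sum of sizes iff everything is disjoint
theorem pv_foldl_update_eq_iff (l : List (List Int)) (s : List Int)
    (hs : s.Nodup) (hl : ∀ c ∈ l, c.Nodup) :
    ((l.foldl (fun s c => PySem.Set.update s c) s).length
        = s.length + (l.map List.length).sum)
      ↔ ((∀ c ∈ l, ∀ x ∈ c, x ∉ s) ∧ l.Pairwise (fun a b => ∀ x ∈ a, x ∉ b)) := by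
  induction l generalizing s with
  | nil => simp
  | cons c l ih =>
    have hcn : c.Nodup := hl c List.mem_cons_self
    have hln : ∀ c' ∈ l, c'.Nodup := fun c' hc' => hl c' (List.mem_cons_of_mem _ hc')
    have hsn : (PySem.Set.update s c).Nodup := PySem.Set.nodup_update s c hs
    simp only [List.foldl_cons, List.map_cons, List.sum_cons]
    have hbound := pv_foldl_update_le l (PySem.Set.update s c) hln
    have hone := pv_len_update_le s c hcn
    constructor
    · intro h
      have e1 : (PySem.Set.update s c).length = s.length + c.length := by omega
      have e2 : (l.foldl (fun s c => PySem.Set.update s c) (PySem.Set.update s c)).length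
          = (PySem.Set.update s c).length + (l.map List.length).sum := by omega
      have hdisj := (pv_len_update_eq_iff s c hcn).mp e1
      have ⟨hrest, hpair⟩ := (ih (PySem.Set.update s c) hsn hln).mp e2
      have hrest' : ∀ c' ∈ l, ∀ x ∈ c', x ∉ s ∧ x ∉ c := by
        intro c' hc' x hx
        have := hrest c' hc' x hx
        rw [PySem.Set.mem_update] at this
        exact ⟨fun h' => this (Or.inl h'), fun h' => this (Or.inr h')⟩
      refine ⟨?_, ?_⟩
      · intro c' hc' x hx
        rcases List.mem_cons.mp hc' with rfl | hc'
        · exact hdisj x hx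
        · exact (hrest' c' hc' x hx).1
      · refine List.pairwise_cons.mpr ⟨?_, hpair⟩
        intro c' hc' x hx hx'
        exact (hrest' c' hc' x hx').2 hx
    · rintro ⟨hall, hpair⟩
      obtain ⟨hfirst, hpair'⟩ := List.pairwise_cons.mp hpair
      have e1 : (PySem.Set.update s c).length = s.length + c.length :=
        (pv_len_update_eq_iff s c hcn).mpr (hall c List.mem_cons_self)
      have e2 := (ih (PySem.Set.update s c) hsn hln).mpr ⟨?_, hpair'⟩
      · omega
      · intro c' hc' x hx
        rw [PySem.Set.mem_update]
        rintro (h' | h')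
        · exact hall c' (List.mem_cons_of_mem _ hc') x hx h'
        · exact hfirst c' hc' x h' hx

-- B's paired fold splits into the union fold and the running Int total
theorem pv_alt_fold (l : List (List Int)) (u : PySem.Set Int) (t : Int) :
    l.foldl
      (fun (st : PySem.Set Int × Int) c =>
        (PySem.Set.union st.1 (PySem.Set.ofList c), st.2 + PySem.Set.len (PySem.Set.ofList c)))
      (u, t)
    = (l.foldl (fun s c => PySem.Set.update s (PySem.Set.ofList c)) u,
       t + (l.map (fun c => PySem.Set.len (PySem.Set.ofList c))).sum) := by
  induction l generalizing u t with
  | nil => simp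
  | cons c l ih =>
    simp only [List.foldl_cons]
    rw [ih]
    simp only [List.map_cons, List.sum_cons, pv_union_eq_update, Prod.mk.injEq]
    exact ⟨trivial, by ring⟩

theorem pv_len_eq_length (s : PySem.Set Int) : PySem.Set.len s = (s.length : Int) := rfl

theorem pv_sum_len_cast (l : List (List Int)) :
    (l.map (fun c => PySem.Set.len (PySem.Set.ofList c))).sum
      = (((l.map (fun c => PySem.Set.ofList c)).map List.length).sum : Int) := by
  induction l with
  | nil => simp
  | cons c l ih => simp [Function.comp_def]

-- ===== VERDICT (by name: the statement is the Claim_ definition above) =====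
theorem is_children_mutual_exclusive_union_of_parent_spec : Claim_equal_is_children_mutual_exclusive_union_of_parent := by
  intro parent children _
  unfold Spec_is_children_mutual_exclusive_union_of_parent
  unfold is_children_mutual_exclusive_union_of_parent
  unfold is_children_mutual_exclusive_union_of_parent_alt
  simp only [pv_alt_fold, pv_toggle_foldl, Bool.true_and, List.foldl_map]
  have hnodup : ∀ c ∈ children.map (fun c => PySem.Set.ofList c), c.Nodup := by
    intro c hc
    obtain ⟨c', _, rfl⟩ := List.mem_map.mp hc
    exact PySem.Set.nodup_ofList c'
  have hiff := pv_foldl_update_eq_iff (children.map fun c => PySem.Set.ofList c) [] List.nodup_nil hnodup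
  rw [List.foldl_map] at hiff
  have hall : (pvCombPairs (children.map fun c => PySem.Set.ofList c)).all
      (fun p => PySem.Set.isdisjoint p.1 p.2)
      = decide (PySem.Set.len
          (children.foldl (fun s c => PySem.Set.update s (PySem.Set.ofList c)) PySem.Set.empty)
          = 0 + (children.map fun c => PySem.Set.len (PySem.Set.ofList c)).sum) := by
    apply Bool.coe_iff_coe.mp
    rw [pv_pairs_all_iff, decide_eq_true_iff, pv_len_eq_length, pv_sum_len_cast]
    have hempty : (PySem.Set.empty : PySem.Set Int) = [] := rfl
    rw [hempty]
    constructor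
    · intro hp
      have h := hiff.mpr ⟨by simp, hp⟩
      rw [h]; push_cast; simp
    · intro hlen
      refine (hiff.mp ?_).2
      simp only [List.length_nil, Nat.zero_add]
      have hlen' : ((children.foldl (fun s c => PySem.Set.update s (PySem.Set.ofList c)) ([] : List Int)).length : Int)
          = (((children.map fun c => PySem.Set.ofList c).map List.length).sum : Int) := by
        simpa using hlen
      exact_mod_cast hlen'
  rw [hall]
  cases hd : decide (PySem.Set.len
      (children.foldl (fun s c => PySem.Set.update s (PySem.Set.ofList c)) PySem.Set.empty)
      = 0 + (children.map fun c => PySem.Set.len (PySem.Set.ofList c)).sum) <;>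
    simp [is_sets_identical]
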